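-- pv_equiv track=rewrite | github.com/4yrg/maze_mind | src/mazemind/envs/maze_parser.py | _extract_maze_rows
-- ===== SOURCE A (Python) =====
-- def _extract_maze_rows(raw_lines: list[str]) -> list[str]:
--     rows = []
--     for line in raw_lines:
--         stripped = line.rstrip("\n\r")
--         if not stripped:
--             continue
--         if stripped.startswith(("o", "|")):
--             rows.append(stripped)
--         elif rows:
--             break
--     return rows
-- ===== SOURCE B (Python) =====
-- def _extract_maze_rows(raw_lines: list[str]) -> list[str]:
--     # clean first, then locate the contiguous block of maze rows and slice it out
--     def is_row(s):
--         return s.startswith(("o", "|"))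
--     cleaned = [s for s in (ln.rstrip("\n\r") for ln in raw_lines) if s]
--     i = 0
--     while i < len(cleaned) and not is_row(cleaned[i]):
--         i += 1
--     j = i
--     while j < len(cleaned) and is_row(cleaned[j]):
--         j += 1
--     return cleaned[i:j]
-- ===== Notes on version B (the rewrite author's own statement) =====
-- stated objective: alternative
-- what changed: Replaces A's stateful single-pass loop with its rows-flag and mid-loop break by a clean-then-slice pipeline: strip and drop empty lines first, then scan for the start and end of the contiguous block of maze rows and return that slice.
import Mathlib
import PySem

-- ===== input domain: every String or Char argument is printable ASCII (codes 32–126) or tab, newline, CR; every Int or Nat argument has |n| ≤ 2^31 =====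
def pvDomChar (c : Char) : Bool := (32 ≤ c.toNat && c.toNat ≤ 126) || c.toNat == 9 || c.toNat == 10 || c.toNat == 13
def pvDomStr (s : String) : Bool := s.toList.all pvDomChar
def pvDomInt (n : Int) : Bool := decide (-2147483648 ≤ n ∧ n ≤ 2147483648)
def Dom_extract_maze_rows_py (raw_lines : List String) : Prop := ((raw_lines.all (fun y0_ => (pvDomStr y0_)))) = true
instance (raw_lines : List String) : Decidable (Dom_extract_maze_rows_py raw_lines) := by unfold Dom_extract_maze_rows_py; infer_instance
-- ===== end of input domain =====

-- B replaces A's stateful loop (rows-flag + break) by clean-then-slice: strip, drop empties, take the contiguous row block.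
-- ===== PORT A =====
-- line.rstrip("\n\r"): hand port (PySem has no one-sided rstrip with a chars argument); exact: drops trailing '\n'/'\r' chars
def pvRstripNR (s : String) : String :=
  String.ofList ((s.toList.reverse.dropWhile (fun c => c == '\n' || c == '\r')).reverse)

-- stripped.startswith(("o", "|"))
def pvIsRow (s : String) : Bool :=
  PySem.Str.startswith s "o" || PySem.Str.startswith s "|"

def extract_maze_rows_py_go (acc : List String) : List String → List String
  | [] => acc
  | l :: rest =>
    let stripped := pvRstripNR l
    if stripped.toList.isEmpty then extract_maze_rows_py_go acc rest
    else if pvIsRow stripped then extract_maze_rows_py_go (acc ++ [stripped]) rest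
    else if acc.isEmpty then extract_maze_rows_py_go acc rest
    else acc

def extract_maze_rows_py (raw_lines : List String) : List String :=
  extract_maze_rows_py_go [] raw_lines

-- ===== PORT B =====
-- cleaned[i:j] with i = end of the non-row prefix, j = end of the row run, is exactly dropWhile/takeWhile
def extract_maze_rows_py_alt (raw_lines : List String) : List String :=
  let cleaned := (raw_lines.map pvRstripNR).filter (fun s => !s.toList.isEmpty)
  (cleaned.dropWhile (fun s => !pvIsRow s)).takeWhile pvIsRow

-- ===== PRECONDITION & SPEC =====
def Spec_extract_maze_rows_py (raw_lines : List String) (out : List String) : Prop := out = extract_maze_rows_py_alt raw_lines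
instance (raw_lines : List String) (out : List String) : Decidable (Spec_extract_maze_rows_py raw_lines out) := by unfold Spec_extract_maze_rows_py; infer_instance

-- ===== CLAIM (what is proved, stated in full; the proofs are below) =====
def Claim_equal_extract_maze_rows_py : Prop := ∀ (raw_lines : List String), Dom_extract_maze_rows_py raw_lines → Spec_extract_maze_rows_py raw_lines (extract_maze_rows_py raw_lines)

-- ===== LEMMAS AND PROOFS =====
theorem extract_maze_rows_py_go_eq (ls : List String) : ∀ acc : List String,
    extract_maze_rows_py_go acc ls =
      (let cleaned := (ls.map pvRstripNR).filter (fun s => !s.toList.isEmpty)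
       if acc.isEmpty then (cleaned.dropWhile (fun s => !pvIsRow s)).takeWhile pvIsRow
       else acc ++ cleaned.takeWhile pvIsRow) := by
  induction ls with
  | nil =>
    intro acc
    cases acc <;> simp [extract_maze_rows_py_go]
  | cons l rest ih =>
    intro acc
    simp only [extract_maze_rows_py_go]
    by_cases he : (pvRstripNR l).toList.isEmpty
    · simp [he, ih acc]
    · by_cases hr : pvIsRow (pvRstripNR l)
      · have := ih (acc ++ [pvRstripNR l])
        cases acc <;>
          simp_all
      · cases acc <;>
          simp_all

-- ===== VERDICT (by name: the statement is the Claim_ definition above) =====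
theorem extract_maze_rows_py_spec : Claim_equal_extract_maze_rows_py := by
  intro raw_lines _
  unfold Spec_extract_maze_rows_py extract_maze_rows_py extract_maze_rows_py_alt
  simp [extract_maze_rows_py_go_eq]
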